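-- pv_equiv track=rewrite | github.com/hanlulong/econ-data-mcp | backend/providers/comtrade.py | _chunk_period_values
-- ===== SOURCE A (Python) =====
-- from typing import Dict, List, Optional, Tuple
--
-- def _chunk_period_values(period_values: List[str], max_periods: int = 12) -> List[str]:
--     """Chunk period values into API-safe comma-separated batches.
--
--     UN Comtrade returns HTTP 400 when the request includes too many periods.
--     Keep chunking centralized so all query shapes use the same guardrail.
--     """
--     if not period_values:
--         return []
--     size = max(1, int(max_periods))
--     return [
--         ",".join(period_values[i:i + size])
--         for i in range(0, len(period_values), size)
--     ]
-- ===== SOURCE B (Python) =====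
-- from typing import List
--
-- def _chunk_period_values(period_values: List[str], max_periods: int = 12) -> List[str]:
--     size = max(1, int(max_periods))
--     chunks: List[str] = []
--     buf: List[str] = []
--     for v in period_values:
--         buf.append(v)
--         if len(buf) == size:
--             chunks.append(",".join(buf))
--             buf = []
--     if buf:
--         chunks.append(",".join(buf))
--     return chunks
-- ===== Notes on version B (the rewrite author's own statement) =====
-- stated objective: alternative
-- what changed: Replaces the stride-indexed slice comprehension with a single element-wise pass that maintains a current-batch buffer and flushes it each time it reaches the batch size.
import Mathlib
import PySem

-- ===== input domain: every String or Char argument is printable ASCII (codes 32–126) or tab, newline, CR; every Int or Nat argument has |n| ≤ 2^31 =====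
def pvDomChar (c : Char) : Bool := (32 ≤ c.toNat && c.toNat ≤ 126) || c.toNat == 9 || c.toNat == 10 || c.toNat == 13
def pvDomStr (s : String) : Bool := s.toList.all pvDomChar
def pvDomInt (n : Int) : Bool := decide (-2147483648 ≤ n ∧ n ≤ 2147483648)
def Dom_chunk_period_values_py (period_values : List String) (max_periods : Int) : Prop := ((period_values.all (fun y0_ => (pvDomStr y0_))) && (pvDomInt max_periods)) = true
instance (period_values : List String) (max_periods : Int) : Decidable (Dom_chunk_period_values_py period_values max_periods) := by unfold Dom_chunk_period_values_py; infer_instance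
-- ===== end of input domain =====

-- B replaces A's stride-indexed slice comprehension with a single element-wise pass
-- maintaining a current-batch buffer that is flushed at each batch boundary (alternative decomposition, same cost).


-- ===== PORT A =====
def chunk_period_values_py (period_values : List String) (max_periods : Int) : List String :=
  if period_values = [] then []
  else
    let size := max 1 max_periods
    (PySem.List.pyRange 0 period_values.length size).map
      (fun i => PySem.Str.join "," (PySem.List.slice period_values (some i) (some (i + size))))

-- ===== PORT B =====
-- one loop step of Source B: append v to the buffer; flush when the buffer reaches size
def chunk_step (size : Int) (st : List String × List String) (v : String) : List String × List String :=
  let buf := st.2 ++ [v]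
  if (buf.length : Int) = size then (st.1 ++ [PySem.Str.join "," buf], []) else (st.1, buf)

def chunk_period_values_py_alt (period_values : List String) (max_periods : Int) : List String :=
  let size := max 1 max_periods
  let r := period_values.foldl (chunk_step size) ([], [])
  if r.2 = [] then r.1 else r.1 ++ [PySem.Str.join "," r.2]

-- ===== PRECONDITION & SPEC =====
def Spec_chunk_period_values_py (period_values : List String) (max_periods : Int) (out : List String) : Prop := out = chunk_period_values_py_alt period_values max_periods
instance (period_values : List String) (max_periods : Int) (out : List String) : Decidable (Spec_chunk_period_values_py period_values max_periods out) := by unfold Spec_chunk_period_values_py; infer_instance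

-- ===== CLAIM (what is proved, stated in full; the proofs are below) =====
def Claim_equal_chunk_period_values_py : Prop := ∀ (period_values : List String) (max_periods : Int), Dom_chunk_period_values_py period_values max_periods → Spec_chunk_period_values_py period_values max_periods (chunk_period_values_py period_values max_periods)

-- ===== LEMMAS AND PROOFS =====

-- reference chunking: batches of size m+1
def pvChunks (m : Nat) : List String → List String
  | [] => []
  | x :: xs => PySem.Str.join "," (x :: xs.take m) :: pvChunks m (xs.drop m)
termination_by xs => xs.length
decreasing_by simp [List.length_drop]

lemma pyRange_pos_cons (a b s : Int) (hs : 0 < s) (hab : a < b) :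
    PySem.List.pyRange a b s = a :: PySem.List.pyRange (a + s) b s := by
  rw [PySem.List.pyRange_of_pos _ _ hs, PySem.List.pyRange_of_pos _ _ hs]
  have hq0 : 0 ≤ (b - a - 1) / s := Int.ediv_nonneg (by omega) (by omega)
  have hdiv : (b - a + s - 1) / s = (b - a - 1) / s + 1 := by
    have := Int.add_mul_ediv_right (b - a - 1) 1 (show s ≠ 0 by omega)
    rw [one_mul] at this
    rw [show b - a + s - 1 = b - a - 1 + s by ring, this]
  have hc2 : (if a + s < b then ((b - (a + s) + s - 1) / s).toNat else 0) = ((b - a - 1) / s).toNat := by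
    by_cases h : a + s < b
    · rw [if_pos h]; congr 1; ring_nf
    · rw [if_neg h]
      have : (b - a - 1) / s = 0 := Int.ediv_eq_zero_of_lt (by omega) (by omega)
      omega
  rw [if_pos hab, hc2, hdiv]
  have : ((b - a - 1) / s + 1).toNat = ((b - a - 1) / s).toNat + 1 := by omega
  rw [this, List.range_succ_eq_map, List.map_cons, List.map_map]
  refine List.cons_eq_cons.mpr ⟨by simp, ?_⟩
  apply List.map_congr_left
  intro k _
  simp only [Function.comp_apply, Nat.succ_eq_add_one]
  push_cast; ring

lemma pyRange_pos_shift (a b s : Int) (hs : 0 < s) :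
    PySem.List.pyRange a b s = (PySem.List.pyRange 0 (b - a) s).map (a + ·) := by
  rw [PySem.List.pyRange_of_pos _ _ hs, PySem.List.pyRange_of_pos _ _ hs, List.map_map]
  have hc : (if (0:Int) < b - a then ((b - a - 0 + s - 1) / s).toNat else 0)
      = (if a < b then ((b - a + s - 1) / s).toNat else 0) := by
    by_cases h : a < b
    · rw [if_pos (by omega), if_pos h]; ring_nf
    · rw [if_neg (by omega), if_neg h]
  rw [hc]
  apply List.map_congr_left
  intro k _
  simp

lemma Acore_eq (s : Int) (hs : 1 ≤ s) (xs : List String) :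
    (PySem.List.pyRange 0 xs.length s).map
      (fun i => PySem.Str.join "," (PySem.List.slice xs (some i) (some (i + s))))
      = pvChunks (s.toNat - 1) xs := by
  have hs0 : 0 < s := by omega
  have hsn : ((s.toNat : Int)) = s := Int.toNat_of_nonneg (by omega)
  have main : ∀ (N : Nat) (xs : List String), xs.length ≤ N →
      (PySem.List.pyRange 0 xs.length s).map
        (fun i => PySem.Str.join "," (PySem.List.slice xs (some i) (some (i + s))))
        = pvChunks (s.toNat - 1) xs := by
    intro N
    induction N with
    | zero =>
      intro xs h
      have hx : xs = [] := List.eq_nil_of_length_eq_zero (by omega)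
      subst hx
      simp [pvChunks, PySem.List.pyRange]
    | succ N ih =>
      intro xs h
      match xs with
      | [] => simp [pvChunks, PySem.List.pyRange]
      | x :: rest =>
        set n : Nat := s.toNat with hn
        have hn1 : 1 ≤ n := by omega
        have hL : ((x :: rest).length : Int) = (rest.length : Int) + 1 := by simp
        rw [pyRange_pos_cons 0 _ s hs0 (by simp), List.map_cons, zero_add, pvChunks]
        have hdropn : (x :: rest).drop n = rest.drop (n - 1) := by
          have hk : n = (n - 1) + 1 := by omega
          conv_lhs => rw [hk]
          rw [List.drop_succ_cons]
        congr 1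
        · rw [PySem.List.slice_toNat _ (le_refl 0) (by omega)]
          have : s.toNat - (0:Int).toNat = (n - 1) + 1 := by omega
          rw [this]
          simp only [Int.toNat_zero, List.drop_zero, List.take_succ_cons]
        · by_cases hl : s < ((x :: rest).length : Int)
          · rw [pyRange_pos_shift s _ s hs0, List.map_map]
            have hnle : n ≤ (x :: rest).length := by simp; omega
            have hlen : ((((x :: rest).drop n).length : Int)) = ((x :: rest).length : Int) - s := by
              rw [List.length_drop]; omega
            rw [← hdropn, ← hlen]
            rw [List.map_congr_left (l := PySem.List.pyRange 0 (((x :: rest).drop n).length) s)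
              (f := (fun i => PySem.Str.join "," (PySem.List.slice (x :: rest) (some i) (some (i + s)))) ∘ (s + ·))
              (g := fun j => PySem.Str.join "," (PySem.List.slice ((x :: rest).drop n) (some j) (some (j + s)))) ?_]
            · exact ih _ (by simp [List.length_drop] at h ⊢; omega)
            · intro j hj
              have hj0 : 0 ≤ j := ((PySem.List.mem_pyRange_iff_of_pos hs0 j).mp hj).1
              simp only [Function.comp_apply]
              congr 1
              rw [PySem.List.slice_toNat _ (by omega) (by omega),
                  PySem.List.slice_toNat _ (by omega) (by omega), List.drop_drop]
              have h2 : (s + j + s).toNat - (s + j).toNat = (j + s).toNat - j.toNat := by omega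
              have h1 : (s + j).toNat = n + j.toNat := by omega
              rw [h2, h1]
          · rw [PySem.List.pyRange_of_pos _ _ hs0, if_neg hl]
            have : rest.drop (n - 1) = [] := List.drop_eq_nil_of_le (by simp at hl ⊢; omega)
            rw [this]
            simp [pvChunks]
  exact main xs.length xs (le_refl _)

lemma pvChunks_cons_block (m : Nat) (zs ws : List String) (hz : zs.length = m + 1) :
    pvChunks m (zs ++ ws) = PySem.Str.join "," zs :: pvChunks m ws := by
  match zs with
  | [] => simp at hz
  | z :: zs' =>
    rw [List.cons_append, pvChunks]
    have hz' : zs'.length = m := by simpa using hz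
    rw [List.take_left' hz', List.drop_left' hz']

lemma Bloop_eq (m : Nat) (xs : List String) : ∀ (acc buf : List String), buf.length ≤ m →
    (let r := List.foldl (chunk_step ((m : Int) + 1)) (acc, buf) xs;
     if r.2 = [] then r.1 else r.1 ++ [PySem.Str.join "," r.2])
      = acc ++ pvChunks m (buf ++ xs) := by
  induction xs with
  | nil =>
    intro acc buf hbuf
    simp only [List.foldl_nil, List.append_nil]
    match buf with
    | [] => simp [pvChunks]
    | b :: bs =>
      have hbs : bs.length ≤ m := by simp at hbuf; omega
      rw [if_neg (by simp), pvChunks, List.take_of_length_le hbs,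
          List.drop_eq_nil_of_le hbs]
      simp [pvChunks]
  | cons v xs' ih =>
    intro acc buf hbuf
    simp only [List.foldl_cons]
    by_cases hfull : ((buf ++ [v]).length : Int) = (m : Int) + 1
    · have hstep : chunk_step ((m : Int) + 1) (acc, buf) v
          = (acc ++ [PySem.Str.join "," (buf ++ [v])], []) := by
        simp only [chunk_step]; rw [if_pos hfull]
      rw [hstep, ih _ [] (by simp)]
      have : buf ++ v :: xs' = (buf ++ [v]) ++ xs' := by simp
      rw [this, pvChunks_cons_block m (buf ++ [v]) xs' (by simp at hfull ⊢; omega)]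
      simp
    · have hstep : chunk_step ((m : Int) + 1) (acc, buf) v = (acc, buf ++ [v]) := by
        simp only [chunk_step]; rw [if_neg hfull]
      rw [hstep, ih _ (buf ++ [v]) (by simp at hfull ⊢; omega)]
      simp

lemma Aport_eq (xs : List String) (mp : Int) :
    chunk_period_values_py xs mp = pvChunks ((max 1 mp).toNat - 1) xs := by
  unfold chunk_period_values_py
  by_cases h : xs = []
  · subst h; simp [pvChunks]
  · rw [if_neg h]
    exact Acore_eq _ (le_max_left _ _) xs

lemma Bport_eq (xs : List String) (mp : Int) :
    chunk_period_values_py_alt xs mp = pvChunks ((max 1 mp).toNat - 1) xs := by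
  have hm : (((max 1 mp).toNat - 1 : Nat) : Int) + 1 = max 1 mp := by
    have : 1 ≤ max 1 mp := le_max_left _ _
    omega
  have hB := Bloop_eq ((max 1 mp).toNat - 1) xs [] [] (by simp)
  rw [hm] at hB
  simpa [chunk_period_values_py_alt] using hB

-- ===== VERDICT (by name: the statement is the Claim_ definition above) =====
theorem chunk_period_values_py_spec : Claim_equal_chunk_period_values_py := by
  intro xs mp _
  unfold Spec_chunk_period_values_py
  rw [Aport_eq, Bport_eq]
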